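-- pv_equiv track=rewrite | github.com/1hyq/ImageDDI | dataloader/.ipynb_checkpoints/image_dataloader-checkpoint.py | identify_common_cliques
-- ===== SOURCE A (Python) =====
-- def identify_common_cliques(cliques1, cliques2):
--     common_cliques = []
--     num_cliques1 = len(cliques1)
--     num_cliques2 = len(cliques2)
--     for index1, clique1 in enumerate(cliques1):
--         for index2, clique2 in enumerate(cliques2):
--             # 检查两个原子团是否包含完全相同的原子索引集合
--             if set(clique1) == set(clique2):
--                 # 如果相同，将它们添加到common_cliques列表中
--                 common_cliques.append((index1, index2 + num_cliques1))
--     return common_cliques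
-- ===== SOURCE B (Python) =====
-- def identify_common_cliques(cliques1, cliques2):
--     # One pass over cliques2 builds an index keyed by the canonical sorted
--     # tuple of each clique's distinct atoms; one pass over cliques1 looks up
--     # all its matches at once -- no inner scan over cliques2.
--     num_cliques1 = len(cliques1)
--     index = {}
--     for index2, clique2 in enumerate(cliques2):
--         key = tuple(sorted(set(clique2)))
--         index[key] = index.get(key, []) + [index2 + num_cliques1]
--     common_cliques = []
--     for index1, clique1 in enumerate(cliques1):
--         for j in index.get(tuple(sorted(set(clique1))), []):
--             common_cliques.append((index1, j))
--     return common_cliques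
-- ===== Notes on version B (the rewrite author's own statement) =====
-- stated objective: faster
-- what changed: Replaces the nested scan comparing every clique1 with every clique2 by set equality with a dict built in one pass over cliques2, keyed by the canonical sorted tuple of distinct atoms, so each clique1 finds all its matches by a single lookup.
import Mathlib
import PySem

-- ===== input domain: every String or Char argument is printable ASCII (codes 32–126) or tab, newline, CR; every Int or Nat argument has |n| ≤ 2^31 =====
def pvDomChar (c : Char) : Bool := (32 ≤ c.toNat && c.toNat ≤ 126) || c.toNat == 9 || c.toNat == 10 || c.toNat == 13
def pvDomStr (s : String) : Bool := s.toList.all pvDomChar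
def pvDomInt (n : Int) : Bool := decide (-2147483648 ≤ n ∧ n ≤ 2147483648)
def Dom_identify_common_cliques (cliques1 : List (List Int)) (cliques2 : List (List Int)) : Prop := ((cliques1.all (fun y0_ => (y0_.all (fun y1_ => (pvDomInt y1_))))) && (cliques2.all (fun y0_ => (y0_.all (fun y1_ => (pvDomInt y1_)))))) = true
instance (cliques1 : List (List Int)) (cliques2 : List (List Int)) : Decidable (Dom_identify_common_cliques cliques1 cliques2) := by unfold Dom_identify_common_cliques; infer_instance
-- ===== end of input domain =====

-- ===== PORT A =====
-- B replaces A's nested equal-set scan by a dict keyed by the canonical sorted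
-- distinct-atom tuple, built in one pass over cliques2 (objective: faster).
def identify_common_cliques (cliques1 : List (List Int)) (cliques2 : List (List Int)) : List (Int × Int) :=
  let num_cliques1 : Int := cliques1.length
  (PySem.List.enumerate cliques1 0).foldl
    (fun common_cliques p =>
      (PySem.List.enumerate cliques2 0).foldl
        (fun common_cliques q =>
          if PySem.Set.equal (PySem.Set.ofList p.2) (PySem.Set.ofList q.2) then
            common_cliques ++ [(p.1, q.1 + num_cliques1)]
          else common_cliques)
        common_cliques)
    []

-- ===== PORT B =====
-- tuple(sorted(set(c))) — the canonical key of a clique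
def pvKey (c : List Int) : List Int :=
  PySem.List.sorted (PySem.Set.ofList c) (fun x => x) false

def identify_common_cliques_alt (cliques1 : List (List Int)) (cliques2 : List (List Int)) : List (Int × Int) :=
  let num_cliques1 : Int := cliques1.length
  let index : PySem.Dict (List Int) (List Int) :=
    (PySem.List.enumerate cliques2 0).foldl
      (fun d q => d.modify (pvKey q.2) [] (fun l => l ++ [q.1 + num_cliques1]))
      PySem.Dict.empty
  (PySem.List.enumerate cliques1 0).foldl
    (fun common_cliques p =>
      (index.getD (pvKey p.2) []).foldl
        (fun common_cliques j => common_cliques ++ [(p.1, j)])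
        common_cliques)
    []

-- ===== PRECONDITION & SPEC =====
def Spec_identify_common_cliques (cliques1 : List (List Int)) (cliques2 : List (List Int)) (out : List (Int × Int)) : Prop := out = identify_common_cliques_alt cliques1 cliques2
instance (cliques1 : List (List Int)) (cliques2 : List (List Int)) (out : List (Int × Int)) : Decidable (Spec_identify_common_cliques cliques1 cliques2 out) := by unfold Spec_identify_common_cliques; infer_instance

-- ===== CLAIM (what is proved, stated in full; the proofs are below) =====
def Claim_equal_identify_common_cliques : Prop := ∀ (cliques1 : List (List Int)) (cliques2 : List (List Int)), Dom_identify_common_cliques cliques1 cliques2 → Spec_identify_common_cliques cliques1 cliques2 (identify_common_cliques cliques1 cliques2)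

-- ===== LEMMAS AND PROOFS =====

-- A's membership test equals B's key comparison: equal element sets iff equal canonical keys
theorem pvKey_eq_equal (a b : List Int) :
    (pvKey b == pvKey a) = PySem.Set.equal (PySem.Set.ofList a) (PySem.Set.ofList b) := by
  rw [Bool.eq_iff_iff]
  simp only [beq_iff_eq, pvKey, PySem.List.sorted_id_eq_sorted_id_iff_perm,
    List.perm_ext_iff_of_nodup (PySem.Set.nodup_ofList b) (PySem.Set.nodup_ofList a),
    PySem.Set.equal_iff, PySem.Set.mem_ofList]
  constructor <;> intro h x <;> exact (h x).symm

-- B's dict lookup lists exactly the shifted indices of the cliques2 entries with the given key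
theorem pvIndex_getD (cliques2 : List (List Int)) (n1 : Int) (c : List Int) :
    ((PySem.List.enumerate cliques2 0).foldl
        (fun d q => d.modify (pvKey q.2) [] (fun l => l ++ [q.1 + n1]))
        PySem.Dict.empty).getD c []
      = ((PySem.List.enumerate cliques2 0).filter (fun q => pvKey q.2 == c)).map
          (fun q => q.1 + n1) := by
  have h := PySem.Dict.getD_foldl_modify_append
    ((PySem.List.enumerate cliques2 0).map (fun q => (pvKey q.2, q.1 + n1)))
    (PySem.Dict.empty) c
  rw [List.foldl_map] at h
  rw [h, List.filter_map]
  simp [PySem.Dict.empty, PySem.Dict.getD, PySem.Dict.get?, Function.comp_def]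

-- ===== VERDICT (by name: the statement is the Claim_ definition above) =====
theorem identify_common_cliques_spec : Claim_equal_identify_common_cliques := by
  intro cliques1 cliques2 _
  unfold Spec_identify_common_cliques identify_common_cliques identify_common_cliques_alt
  simp only [pvIndex_getD, PySem.List.foldl_append_singleton_eq_map,
    PySem.List.foldl_append_if, List.map_map]
  congr 1
  funext acc p
  congr 1
  rw [show (fun q : Int × List Int => pvKey q.2 == pvKey p.2)
        = (fun q : Int × List Int => PySem.Set.equal (PySem.Set.ofList p.2) (PySem.Set.ofList q.2))
      from funext fun q => pvKey_eq_equal p.2 q.2]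
  rfl
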